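-- pv_equiv track=rewrite | github.com/SW-in-beta/algorithm | 백준/Gold/18808. 스티커 붙이기/스티커 붙이기.py | sticker_to_bin
-- ===== SOURCE A (Python) =====
-- def sticker_to_bin(sticker):
--     result = []
--     for row in sticker:
--         res = 0
--         for col in row:
--             res = res << 1
--             res += int(col)
--         result.append(res)
--     return result
-- ===== SOURCE B (Python) =====
-- def sticker_to_bin(sticker):
--     return [sum(int(col) << (len(row) - 1 - i) for i, col in enumerate(row))
--             for row in sticker]
-- ===== Notes on version B (the rewrite author's own statement) =====
-- stated objective: alternative
-- what changed: Replaces the explicit accumulator loop with Horner steps (res<<1)+int(col) by a comprehension summing each cell's positional contribution int(col)<<(len(row)-1-i) over enumerate.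
import Mathlib
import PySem

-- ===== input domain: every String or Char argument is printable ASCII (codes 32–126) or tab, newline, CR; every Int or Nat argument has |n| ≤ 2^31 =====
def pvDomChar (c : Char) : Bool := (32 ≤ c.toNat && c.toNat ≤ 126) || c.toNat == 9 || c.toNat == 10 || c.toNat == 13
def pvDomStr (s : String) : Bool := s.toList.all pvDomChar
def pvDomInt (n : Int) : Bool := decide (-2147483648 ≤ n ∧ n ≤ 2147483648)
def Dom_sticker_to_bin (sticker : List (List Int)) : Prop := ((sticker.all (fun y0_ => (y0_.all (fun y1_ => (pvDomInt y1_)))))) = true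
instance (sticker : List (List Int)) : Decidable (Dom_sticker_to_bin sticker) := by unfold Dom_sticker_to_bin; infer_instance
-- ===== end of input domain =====

-- B replaces A's running Horner accumulator by a per-cell positional sum (col << (n-1-i)) over enumerate; alternative decomposition, same cost.

-- ===== PORT A =====
-- Python `res << 1` on int is exactly `res * 2` (arithmetic shift, also for negatives); `int(col)` is `col` here.
def sticker_to_bin (sticker : List (List Int)) : List Int :=
  sticker.foldl (fun result row =>
    result ++ [row.foldl (fun res col => res * 2 + col) 0]) []

-- ===== PORT B =====
-- `int(col) << (len(row)-1-i)`: i ∈ [0, len-1], so the shift amount is the Nat `row.length - 1 - i.toNat`.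
def sticker_to_bin_alt (sticker : List (List Int)) : List Int :=
  sticker.map (fun row =>
    ((PySem.List.enumerate row 0).map
      (fun p => p.2 * 2 ^ (row.length - 1 - p.1.toNat))).sum)

-- ===== PRECONDITION & SPEC =====
def Spec_sticker_to_bin (sticker : List (List Int)) (out : List Int) : Prop := out = sticker_to_bin_alt sticker
instance (sticker : List (List Int)) (out : List Int) : Decidable (Spec_sticker_to_bin sticker out) := by unfold Spec_sticker_to_bin; infer_instance

-- ===== CLAIM (what is proved, stated in full; the proofs are below) =====
def Claim_equal_sticker_to_bin : Prop := ∀ (sticker : List (List Int)), Dom_sticker_to_bin sticker → Spec_sticker_to_bin sticker (sticker_to_bin sticker)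

-- ===== LEMMAS AND PROOFS =====

theorem pv_enumerate_shift (xs : List Int) (s : Int) :
    PySem.List.enumerate xs (s + 1) = (PySem.List.enumerate xs s).map (fun p => (p.1 + 1, p.2)) := by
  induction xs generalizing s with
  | nil => simp [PySem.List.enumerate_nil]
  | cons c t ih =>
    simp only [PySem.List.enumerate_cons, List.map_cons]
    rw [show s + 1 + 1 = (s + 1) + 1 by ring, ih (s + 1)]

theorem pv_row_eq (row : List Int) (a : Int) :
    row.foldl (fun res col => res * 2 + col) a
      = a * 2 ^ row.length
        + ((PySem.List.enumerate row 0).map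
            (fun p => p.2 * 2 ^ (row.length - 1 - p.1.toNat))).sum := by
  induction row generalizing a with
  | nil => simp [PySem.List.enumerate_nil]
  | cons c t ih =>
    have hcong : ∀ p ∈ PySem.List.enumerate t 0,
        ((fun p : Int × Int => p.2 * 2 ^ ((c :: t).length - 1 - p.1.toNat)) ∘
          (fun p : Int × Int => (p.1 + 1, p.2))) p
          = p.2 * 2 ^ (t.length - 1 - p.1.toNat) := by
      intro p hp
      obtain ⟨k, hk, rfl⟩ := (PySem.List.mem_enumerate_iff t 0 p).1 hp
      simp only [Function.comp]
      simp only [List.length_cons]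
      norm_num
      omega
    calc (c :: t).foldl (fun res col => res * 2 + col) a
        = t.foldl (fun res col => res * 2 + col) (a * 2 + c) := by simp
      _ = (a * 2 + c) * 2 ^ t.length
            + ((PySem.List.enumerate t 0).map
                (fun p => p.2 * 2 ^ (t.length - 1 - p.1.toNat))).sum := ih _
      _ = a * 2 ^ (c :: t).length
            + (((PySem.List.enumerate t 0).map (fun p => ((p.1 + 1 : Int), p.2))).map
                (fun p => p.2 * 2 ^ ((c :: t).length - 1 - p.1.toNat))).sum
              + c * 2 ^ ((c :: t).length - 1 - (0 : Int).toNat) := by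
          rw [List.map_map]
          rw [List.map_congr_left hcong]
          simp [List.length_cons, pow_succ]
          ring
      _ = a * 2 ^ (c :: t).length
            + ((PySem.List.enumerate (c :: t) 0).map
                (fun p => p.2 * 2 ^ ((c :: t).length - 1 - p.1.toNat))).sum := by
          rw [PySem.List.enumerate_cons, show (0 : Int) + 1 = 0 + 1 by ring,
            pv_enumerate_shift t 0]
          simp only [List.map_cons, List.sum_cons]
          ring

theorem pv_main (sticker : List (List Int)) :
    sticker_to_bin sticker = sticker_to_bin_alt sticker := by
  unfold sticker_to_bin sticker_to_bin_alt
  induction sticker using List.reverseRecOn with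
  | nil => rfl
  | append_singleton t r ih =>
      rw [List.foldl_append, List.map_append, ih]
      simp [pv_row_eq r 0]

-- ===== VERDICT (by name: the statement is the Claim_ definition above) =====
theorem sticker_to_bin_spec : Claim_equal_sticker_to_bin :=
  fun sticker _ => pv_main sticker
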